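-- pv_equiv track=rewrite | github.com/isayaksh/Algorithm | BaekJoon/2193.py | solution
-- ===== SOURCE A (Python) =====
-- def solution(n, k):
--     answer = False
--
--     # binary search
--     start, end = 0, n
--     while not answer and start <= end:
--         mid = (start + end) // 2
--         if (mid+1) * (n-mid+1) < k:
--             start = mid+1
--         if (mid+1) * (n-mid+1) > k:
--             end = mid-1
--         if (mid+1) * (n-mid+1) == k:
--             return "YES"
--
--     return "NO"
-- ===== SOURCE B (Python) =====
-- def solution(n, k):
--     def helper(start, end):
--         if start > end:
--             return "NO"
--         mid = (start + end) // 2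
--         v = (mid + 1) * (n - mid + 1)
--         if v == k:
--             return "YES"
--         if v < k:
--             return helper(mid + 1, end)
--         return helper(start, mid - 1)
--     return helper(0, n)
-- ===== Notes on version B (the rewrite author's own statement) =====
-- stated objective: alternative
-- what changed: The iterative while-loop with a dead 'answer' flag and three sequential in-place updates of start/end is re-decomposed as a recursive divide-and-conquer helper(start, end) with an early-return if/elif chain.
import Mathlib
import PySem

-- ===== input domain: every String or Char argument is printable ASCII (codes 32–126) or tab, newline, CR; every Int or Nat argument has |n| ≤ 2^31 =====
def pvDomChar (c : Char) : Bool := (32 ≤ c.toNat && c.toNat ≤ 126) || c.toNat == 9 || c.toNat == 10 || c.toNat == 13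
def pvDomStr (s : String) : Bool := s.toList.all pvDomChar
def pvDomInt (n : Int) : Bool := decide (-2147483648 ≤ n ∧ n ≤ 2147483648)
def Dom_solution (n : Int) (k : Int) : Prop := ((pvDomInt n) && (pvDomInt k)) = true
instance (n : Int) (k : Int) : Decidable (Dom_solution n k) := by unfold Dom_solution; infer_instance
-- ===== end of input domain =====

-- B re-decomposes A's iterative binary-search loop (with its dead `answer` flag and
-- sequential start/end updates) as a recursive helper with an early-return if/elif chain;
-- same search path, same result on every input.

-- mid = (start+end)//2 lies in [start, end] when start ≤ end (used by both ports' termination)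
theorem pv_mid_bounds (s e : Int) (h : s ≤ e) :
    s ≤ PySem.Int.floordiv (s + e) 2 ∧ PySem.Int.floordiv (s + e) 2 ≤ e := by
  rw [PySem.Int.floordiv_eq_ediv_of_pos (by norm_num : (0:Int) < 2)]
  omega

-- ===== PORT A =====
-- the Python loop body: `answer` is initialised False and never assigned, so the
-- loop condition `not answer and start <= end` is transliterated as `start ≤ end`.
def solutionGo (n k start e : Int) : String :=
  if h : start ≤ e then
    let mid := PySem.Int.floordiv (start + e) 2
    let start1 := if (mid + 1) * (n - mid + 1) < k then mid + 1 else start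
    let e1 := if (mid + 1) * (n - mid + 1) > k then mid - 1 else e
    if (mid + 1) * (n - mid + 1) = k then "YES"
    else solutionGo n k start1 e1
  else "NO"
termination_by (e - start + 1).toNat
decreasing_by
  have := pv_mid_bounds start e h
  simp only [mid] at *
  split_ifs with h1 h2 h2 <;> omega

def solution (n : Int) (k : Int) : String := solutionGo n k 0 n

-- ===== PORT B =====
def solutionHelper (n k start e : Int) : String :=
  if h : start > e then "NO"
  else
    let mid := PySem.Int.floordiv (start + e) 2
    let v := (mid + 1) * (n - mid + 1)
    if v = k then "YES"
    else if v < k then solutionHelper n k (mid + 1) e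
    else solutionHelper n k start (mid - 1)
termination_by (e - start + 1).toNat
decreasing_by
  · have := pv_mid_bounds start e (by omega)
    omega
  · have := pv_mid_bounds start e (by omega)
    omega

def solution_alt (n : Int) (k : Int) : String := solutionHelper n k 0 n

-- ===== PRECONDITION & SPEC =====
def Spec_solution (n : Int) (k : Int) (out : String) : Prop := out = solution_alt n k
instance (n : Int) (k : Int) (out : String) : Decidable (Spec_solution n k out) := by unfold Spec_solution; infer_instance

-- ===== CLAIM (what is proved, stated in full; the proofs are below) =====
def Claim_equal_solution : Prop := ∀ (n : Int) (k : Int), Dom_solution n k → Spec_solution n k (solution n k)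

-- ===== LEMMAS AND PROOFS =====
theorem pv_go_eq_helper (n k : Int) :
    ∀ (N : ℕ) (s e : Int), (e - s + 1).toNat ≤ N →
      solutionGo n k s e = solutionHelper n k s e := by
  intro N
  induction N with
  | zero =>
    intro s e hN
    have hse : s > e := by omega
    rw [solutionGo, solutionHelper]
    simp [not_le.mpr hse, hse]
  | succ N ih =>
    intro s e hN
    by_cases hse : s ≤ e
    · have hmid := pv_mid_bounds s e hse
      rw [solutionGo, solutionHelper]
      simp only [dif_pos hse, dif_neg (not_lt.mpr hse)]
      set mid := PySem.Int.floordiv (s + e) 2 with hm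
      rcases lt_trichotomy ((mid + 1) * (n - mid + 1)) k with hv | hv | hv
      · have h1 : ¬ (mid + 1) * (n - mid + 1) = k := by omega
        have h2 : ¬ (mid + 1) * (n - mid + 1) > k := by omega
        simp only [if_neg h1, if_pos hv, if_neg h2]
        exact ih (mid + 1) e (by omega)
      · simp only [if_pos hv]
      · have h1 : ¬ (mid + 1) * (n - mid + 1) = k := by omega
        have h3 : ¬ (mid + 1) * (n - mid + 1) < k := by omega
        simp only [if_neg h1, if_neg h3, if_pos hv]
        exact ih s (mid - 1) (by omega)
    · have hgt : s > e := by omega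
      rw [solutionGo, solutionHelper, dif_neg hse, dif_pos hgt]

-- ===== VERDICT (by name: the statement is the Claim_ definition above) =====
theorem solution_spec : Claim_equal_solution := by
  intro n k _
  unfold Spec_solution solution solution_alt
  exact pv_go_eq_helper n k (n - 0 + 1).toNat 0 n le_rfl
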